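-- pv_equiv track=rewrite | github.com/Prajjwal-Vish/snapfen-backend | flip_board_to_black_pov.py | reverse_rank
-- ===== SOURCE A (Python) =====
-- def reverse_rank(rank_str: str) -> str:
--     """Reverse files in a single rank string (mirrors horizontally)."""
--     # Use python-chess to expand (e.g., '8' -> '11111111')
--     expanded = ""
--     for char in rank_str:
--         if char.isdigit():
--             expanded += '1' * int(char)
--         else:
--             expanded += char
--     # Reverse the expanded string and then re-compress
--     reversed_expanded = expanded[::-1]
--
--     # Re-compress
--     new_rank_str = ""
--     empty_count = 0
--     for char in reversed_expanded:
--         if char == '1':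
--             empty_count += 1
--         else:
--             if empty_count > 0:
--                 new_rank_str += str(empty_count)
--                 empty_count = 0
--             new_rank_str += char
--     if empty_count > 0:
--         new_rank_str += str(empty_count)
--
--     return new_rank_str
-- ===== SOURCE B (Python) =====
-- def reverse_rank(rank_str: str) -> str:
--     """Reverse files in a single rank string (mirrors horizontally)."""
--     # Single pass over the reversed rank: keep a running empty-square count,
--     # no intermediate expanded '1'-string.
--     out = []
--     empty_count = 0
--     for char in reversed(rank_str):
--         if char.isdigit():
--             empty_count += int(char)
--         else:
--             if empty_count > 0:
--                 out.append(str(empty_count))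
--                 empty_count = 0
--             out.append(char)
--     if empty_count > 0:
--         out.append(str(empty_count))
--     return "".join(out)
-- ===== Notes on version B (the rewrite author's own statement) =====
-- stated objective: faster
-- what changed: Replaces A's expand-to-'1's / reverse / recompress three-pass pipeline with one pass over the reversed input that accumulates an integer empty-square count and flushes it before each piece, never building the expanded string.
import Mathlib
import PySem

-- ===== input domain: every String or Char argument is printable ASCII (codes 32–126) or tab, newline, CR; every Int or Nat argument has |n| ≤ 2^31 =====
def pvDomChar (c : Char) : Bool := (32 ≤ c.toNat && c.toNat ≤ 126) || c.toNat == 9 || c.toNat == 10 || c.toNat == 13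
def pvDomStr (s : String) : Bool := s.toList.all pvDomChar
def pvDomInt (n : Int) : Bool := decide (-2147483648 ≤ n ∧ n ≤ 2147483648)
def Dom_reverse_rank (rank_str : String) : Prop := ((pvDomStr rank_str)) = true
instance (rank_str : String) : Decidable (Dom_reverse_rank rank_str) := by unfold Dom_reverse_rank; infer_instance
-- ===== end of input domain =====

-- B replaces A's expand/reverse/recompress three-pass pipeline by one pass over the
-- reversed input keeping an integer empty-square count (alternative decomposition).

-- ===== PORT A =====
-- '1' * int(char): for an ASCII digit char, int(char) = char.toNat - 48 (exact on Dom).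
def pvExpandStep (acc : List Char) (c : Char) : List Char :=
  if PySem.Chars.isdigit c then acc ++ List.replicate (c.toNat - 48) '1' else acc ++ [c]

-- one iteration of A's re-compress loop, state = (new_rank_str, empty_count)
def pvCompressStep (st : List Char × Int) (c : Char) : List Char × Int :=
  if c = '1' then (st.1, st.2 + 1)
  else ((if st.2 > 0 then st.1 ++ PySem.Int.toChars st.2 else st.1) ++ [c], 0)

def reverse_rank (rank_str : String) : String :=
  let expanded := rank_str.toList.foldl pvExpandStep []
  let reversed_expanded := expanded.reverse          -- expanded[::-1]
  let st := reversed_expanded.foldl pvCompressStep ([], 0)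
  String.ofList (if st.2 > 0 then st.1 ++ PySem.Int.toChars st.2 else st.1)

-- ===== PORT B =====
-- one iteration of B's single loop, state = (out chunks, empty_count)
def pvAltStep (st : List (List Char) × Int) (c : Char) : List (List Char) × Int :=
  if PySem.Chars.isdigit c then (st.1, st.2 + ((c.toNat - 48 : Nat) : Int))
  else ((if st.2 > 0 then st.1 ++ [PySem.Int.toChars st.2] else st.1) ++ [[c]], 0)

def reverse_rank_alt (rank_str : String) : String :=
  let st := rank_str.toList.reverse.foldl pvAltStep ([], 0)
  let out := if st.2 > 0 then st.1 ++ [PySem.Int.toChars st.2] else st.1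
  String.ofList (PySem.Chars.join [] out)                -- "".join(out)

-- ===== PRECONDITION & SPEC =====
def Spec_reverse_rank (rank_str : String) (out : String) : Prop := out = reverse_rank_alt rank_str
instance (rank_str : String) (out : String) : Decidable (Spec_reverse_rank rank_str out) := by unfold Spec_reverse_rank; infer_instance

-- ===== CLAIM (what is proved, stated in full; the proofs are below) =====
def Claim_equal_reverse_rank : Prop := ∀ (rank_str : String), Dom_reverse_rank rank_str → Spec_reverse_rank rank_str (reverse_rank rank_str)

-- ===== LEMMAS AND PROOFS =====

-- the block a single char contributes to A's expanded string
def pvBlock (c : Char) : List Char :=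
  if PySem.Chars.isdigit c then List.replicate (c.toNat - 48) '1' else [c]

theorem pvExpand_eq_flatMap (l : List Char) (acc : List Char) :
    l.foldl pvExpandStep acc = acc ++ l.flatMap pvBlock := by
  induction l generalizing acc with
  | nil => simp
  | cons c t ih =>
    simp only [List.foldl_cons, List.flatMap_cons, ih, pvExpandStep, pvBlock]
    split <;> simp

theorem pvBlock_reverse (c : Char) : (pvBlock c).reverse = pvBlock c := by
  unfold pvBlock; split <;> simp

theorem pvCompress_replicate (k : Nat) (st : List Char × Int) :
    (List.replicate k '1').foldl pvCompressStep st = (st.1, st.2 + k) := by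
  induction k generalizing st with
  | zero => simp
  | succ n ih =>
    simp only [List.replicate_succ, List.foldl_cons, ih, pvCompressStep, if_true, Prod.mk.injEq,
      Nat.cast_add, Nat.cast_one]
    refine ⟨by simp, by omega⟩

theorem pvJoin_flatten (l : List (List Char)) : PySem.Chars.join [] l = l.flatten := by
  induction l with
  | nil => simp [PySem.Chars.join, List.intercalate]
  | cons h t ih =>
    cases t with
    | nil => simp [PySem.Chars.join, List.intercalate]
    | cons h2 t2 =>
      rw [PySem.Chars.join_cons_cons, ih]
      simp

theorem pvMain (l : List Char) (chunks : List (List Char)) (cnt : Int) :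
    (l.flatMap pvBlock).foldl pvCompressStep (chunks.flatten, cnt)
      = (((l.foldl pvAltStep (chunks, cnt)).1).flatten, (l.foldl pvAltStep (chunks, cnt)).2) := by
  induction l generalizing chunks cnt with
  | nil => simp
  | cons c t ih =>
    simp only [List.flatMap_cons, List.foldl_append, List.foldl_cons]
    by_cases hd : PySem.Chars.isdigit c
    · rw [show pvBlock c = List.replicate (c.toNat - 48) '1' from by simp [pvBlock, hd]]
      rw [pvCompress_replicate]
      rw [show pvAltStep (chunks, cnt) c = (chunks, cnt + ((c.toNat - 48 : Nat) : Int)) from by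
        simp [pvAltStep, hd]]
      exact ih chunks _
    · have h1 : c ≠ '1' := by
        intro h; subst h; simp [PySem.Chars.isdigit] at hd
      rw [show pvBlock c = [c] from by simp [pvBlock, hd]]
      rw [show pvAltStep (chunks, cnt) c
            = ((if cnt > 0 then chunks ++ [PySem.Int.toChars cnt] else chunks) ++ [[c]], 0) from by
        simp [pvAltStep, hd]]
      have h2 : [c].foldl pvCompressStep (chunks.flatten, cnt)
          = ((((if cnt > 0 then chunks ++ [PySem.Int.toChars cnt] else chunks) ++ [[c]]).flatten), 0) := by
        simp only [List.foldl_cons, List.foldl_nil, pvCompressStep, if_neg h1]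
        split <;> simp
      rw [h2, ← ih]

-- ===== VERDICT (by name: the statement is the Claim_ definition above) =====
theorem reverse_rank_spec : Claim_equal_reverse_rank := by
  intro s _
  show _ = _
  unfold reverse_rank reverse_rank_alt
  simp only [pvExpand_eq_flatMap, List.nil_append, List.reverse_flatMap]
  simp only [Function.comp_def, pvBlock_reverse]
  rw [pvJoin_flatten]
  have := pvMain s.toList.reverse [] 0
  simp only [List.flatten_nil] at this
  rw [this]
  cases h : (s.toList.reverse.foldl pvAltStep ([], 0)) with
  | mk a b => simp only; split <;> simp
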